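-- pv_equiv track=rewrite | github.com/Pawan-Bhatt/Leetcode_solution | Even and Odd - GFG/even-and-odd.py | check
-- ===== SOURCE A (Python) =====
-- def check(arr, n):
--     flag = 1
--     c=d=0
--     for i in range(n):
--         if i%2==0:
--             if arr[i]%2:
--                 flag = 0
--                 break
--             else:
--                 c+=1
--         else:
--             if arr[i]%2==0:
--                 flag = 0
--                 break
--             else:
--                 d+=1
--     if c!=d:
--         flag = 0
--
--     return flag
-- ===== SOURCE B (Python) =====
-- def check(arr, n):
--     if n % 2:
--         return 0
--     for i in range(0, n, 2):
--         if arr[i] % 2 or arr[i + 1] % 2 == 0: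
--             return 0
--     return 1
-- ===== Notes on version B (the rewrite author's own statement) =====
-- stated objective: simpler
-- what changed: Replaces A's flag plus even/odd-index counters with an index-parity branch by an upfront n % 2 test and a stride-2 pairwise scan that checks each (even-index, odd-index) pair directly with early returns; Pre_ restricts to the natural domain 0 <= n (where A vacuously returns 1 for negative n, B's parity pre-test returns 0 for odd negative n) and excludes the inputs where A raises IndexError (n > len(arr) with no earlier parity mismatch).
-- outside the precondition, e.g. on check([], -3): A returns 1, B returns 0; on check([1, 2], -1): A returns 1, B returns 0
import Mathlib
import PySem

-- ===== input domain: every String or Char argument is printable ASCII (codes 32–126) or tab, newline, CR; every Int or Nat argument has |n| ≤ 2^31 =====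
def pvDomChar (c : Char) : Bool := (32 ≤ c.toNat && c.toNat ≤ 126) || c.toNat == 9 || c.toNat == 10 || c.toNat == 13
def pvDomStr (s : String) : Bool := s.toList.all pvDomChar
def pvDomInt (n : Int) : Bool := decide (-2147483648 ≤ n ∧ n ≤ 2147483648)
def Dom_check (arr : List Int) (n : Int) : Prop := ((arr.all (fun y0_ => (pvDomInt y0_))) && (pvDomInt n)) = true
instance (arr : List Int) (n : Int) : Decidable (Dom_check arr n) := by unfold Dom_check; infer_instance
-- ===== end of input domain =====

-- B replaces A's flag + even/odd-index counters + per-index parity branch by an upfront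
-- n % 2 test and a stride-2 pairwise scan over (even-index, odd-index) pairs (objective: simpler).

-- ===== PORT A =====
-- A's 'for i in range(n)' with break: recursion on the loop counter i carrying (flag, c, d);
-- arr[i] is ported as pyGetD arr i 0, exact under Pre_check (no IndexError there).
def checkLoop (arr : List Int) (n : Int) (i : Int) (c d : Int) : Int × Int × Int :=
  if _h : i < n then
    if PySem.Int.mod i 2 = 0 then
      if PySem.Int.mod (PySem.List.pyGetD arr i 0) 2 ≠ 0 then (0, c, d)
      else checkLoop arr n (i + 1) (c + 1) d
    else
      if PySem.Int.mod (PySem.List.pyGetD arr i 0) 2 = 0 then (0, c, d)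
      else checkLoop arr n (i + 1) c (d + 1)
  else (1, c, d)
  termination_by (n - i).toNat
  decreasing_by all_goals omega

def check (arr : List Int) (n : Int) : Int :=
  let r := checkLoop arr n 0 0 0
  if r.2.1 ≠ r.2.2 then 0 else r.1

-- ===== PORT B =====
-- B's 'for i in range(0, n, 2)' with early returns: recursion on i stepping by 2;
-- the short-circuit 'arr[i] % 2 or arr[i+1] % 2 == 0' becomes two nested ifs.
def pairLoop (arr : List Int) (n : Int) (i : Int) : Int :=
  if _h : i < n then
    if PySem.Int.mod (PySem.List.pyGetD arr i 0) 2 ≠ 0 then 0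
    else if PySem.Int.mod (PySem.List.pyGetD arr (i + 1) 0) 2 = 0 then 0
    else pairLoop arr n (i + 2)
  else 1
  termination_by (n - i).toNat
  decreasing_by all_goals omega

def check_alt (arr : List Int) (n : Int) : Int :=
  if PySem.Int.mod n 2 ≠ 0 then 0
  else pairLoop arr n 0

-- ===== PRECONDITION & SPEC =====
-- Pre_check restricts to the natural domain 0 ≤ n (for negative n A vacuously returns 1
-- while B's parity pre-test returns 0 for odd negative n) and excludes exactly the inputs
-- where Python A raises IndexError: n exceeds len(arr) and no parity mismatch stops the
-- loop before it runs off the end of arr.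
def Pre_check (arr : List Int) (n : Int) : Prop :=
  0 ≤ n ∧
  ¬ ((arr.length : Int) < n ∧
     ∀ i : Nat, i < arr.length → PySem.Int.mod (arr.getD i 0) 2 = PySem.Int.mod (i : Int) 2)
instance (arr : List Int) (n : Int) : Decidable (Pre_check arr n) := by
  unfold Pre_check; infer_instance
def pvWitness_check : List Int × Int := ([0, 1, 2, 3], 4)

def Spec_check (arr : List Int) (n : Int) (out : Int) : Prop := out = check_alt arr n
instance (arr : List Int) (n : Int) (out : Int) : Decidable (Spec_check arr n out) := by
  unfold Spec_check; infer_instance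

-- ===== CLAIM (what is proved, stated in full; the proofs are below) =====
def Claim_equal_check : Prop := ∀ (arr : List Int) (n : Int), Dom_check arr n → Pre_check arr n → Spec_check arr n (check arr n)

-- ===== LEMMAS AND PROOFS =====

-- Python mod by 2 is Int.emod
theorem pvMod2 (a : Int) : PySem.Int.mod a 2 = a % 2 :=
  PySem.Int.mod_eq_emod_of_pos (by norm_num)

-- proof-side mismatch scanner: scans indices i, i+1, … one at a time
def anyMismatchFrom (arr : List Int) (n : Int) (i : Int) : Bool :=
  if _h : i < n then
    if PySem.Int.mod (PySem.List.pyGetD arr i 0) 2 ≠ PySem.Int.mod i 2 then true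
    else anyMismatchFrom arr n (i + 1)
  else false
  termination_by (n - i).toNat
  decreasing_by all_goals omega

-- list-indexed replays of A's loop and the scanner, for induction over the index list
def checkLoopL (arr : List Int) : List Int → Int × Int → Int × Int × Int
  | [], (c, d) => (1, c, d)
  | i :: rest, (c, d) =>
    if PySem.Int.mod i 2 = 0 then
      if PySem.Int.mod (PySem.List.pyGetD arr i 0) 2 ≠ 0 then (0, c, d)
      else checkLoopL arr rest (c + 1, d)
    else
      if PySem.Int.mod (PySem.List.pyGetD arr i 0) 2 = 0 then (0, c, d)
      else checkLoopL arr rest (c, d + 1)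

def anyMismatchL (arr : List Int) : List Int → Bool
  | [] => false
  | i :: rest =>
    if PySem.Int.mod (PySem.List.pyGetD arr i 0) 2 ≠ PySem.Int.mod i 2 then true
    else anyMismatchL arr rest

theorem checkLoop_eq_list (arr : List Int) (n : Int) (m : Nat) :
    ∀ i c d, (n - i).toNat = m →
      checkLoop arr n i c d = checkLoopL arr (PySem.List.pyRange i n 1) (c, d) := by
  induction m with
  | zero =>
    intro i c d hm
    rw [checkLoop, PySem.List.pyRange_one_eq_nil (by omega), dif_neg (by omega)]
    rfl
  | succ m ih =>
    intro i c d hm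
    rw [checkLoop, PySem.List.pyRange_one_cons (by omega), dif_pos (by omega)]
    simp only [checkLoopL]
    split_ifs <;> first | rfl | exact ih _ _ _ (by omega)

theorem anyMismatch_eq_list (arr : List Int) (n : Int) (m : Nat) :
    ∀ i, (n - i).toNat = m →
      anyMismatchFrom arr n i = anyMismatchL arr (PySem.List.pyRange i n 1) := by
  induction m with
  | zero =>
    intro i hm
    rw [anyMismatchFrom, PySem.List.pyRange_one_eq_nil (by omega), dif_neg (by omega)]
    rfl
  | succ m ih =>
    intro i hm
    rw [anyMismatchFrom, PySem.List.pyRange_one_cons (by omega), dif_pos (by omega)]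
    simp only [anyMismatchL]
    split_ifs <;> first | rfl | exact ih _ (by omega)

-- A's flag equals 0 exactly when the scanner finds a mismatch
theorem flag_eq (arr : List Int) (L : List Int) (c d : Int) :
    (checkLoopL arr L (c, d)).1 = if anyMismatchL arr L then 0 else 1 := by
  induction L generalizing c d with
  | nil => simp [checkLoopL, anyMismatchL]
  | cons i rest ih =>
    simp only [checkLoopL, anyMismatchL, pvMod2]
    rcases Int.emod_two_eq_zero_or_one i with hi | hi <;>
      rcases Int.emod_two_eq_zero_or_one (PySem.List.pyGetD arr i 0) with ha | ha <;>
      simp only [hi, ha] <;> simp [ih]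

-- signed balance of even-index vs odd-index entries of an index list
def bal : List Int → Int
  | [] => 0
  | i :: r => (if PySem.Int.mod i 2 = 0 then 1 else -1) + bal r

theorem counts_eq (arr : List Int) (L : List Int) (c d : Int)
    (h : anyMismatchL arr L = false) :
    (checkLoopL arr L (c, d)).2.1 - (checkLoopL arr L (c, d)).2.2 = c - d + bal L := by
  induction L generalizing c d with
  | nil => simp [checkLoopL, bal]
  | cons i rest ih =>
    rcases Int.emod_two_eq_zero_or_one i with hi | hi <;>
      rcases Int.emod_two_eq_zero_or_one (PySem.List.pyGetD arr i 0) with ha | ha <;>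
      simp only [anyMismatchL, checkLoopL, bal, pvMod2, hi, ha] at h ⊢ <;>
      simp at h ⊢ <;>
      rw [ih _ _ h] <;> ring

theorem bal_pyRange (m : Nat) : ∀ k : Int, bal (PySem.List.pyRange k (k + m) 1) =
    if m % 2 = 0 then 0 else (if k % 2 = 0 then 1 else -1) := by
  induction m with
  | zero => intro k; simp [bal]
  | succ m ih =>
    intro k
    rw [PySem.List.pyRange_one_cons (by push_cast; omega : k < k + ((m + 1 : Nat) : Int))]
    have h1 : k + ((m + 1 : Nat) : Int) = (k + 1) + (m : Nat) := by push_cast; ring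
    rw [bal, h1, ih (k + 1), pvMod2]
    rcases Nat.even_or_odd m with hm | hm <;> split_ifs <;> omega

-- B's pair loop equals the one-at-a-time mismatch scan, for even i and even n
theorem pairLoop_eq (arr : List Int) (n : Int) (hn : n % 2 = 0) (m : Nat) :
    ∀ i, i % 2 = 0 → n - i = 2 * (m : Int) →
      pairLoop arr n i = if anyMismatchFrom arr n i then 0 else 1 := by
  induction m with
  | zero =>
    intro i _ hm
    rw [pairLoop, anyMismatchFrom, dif_neg (by omega), dif_neg (by omega)]
    simp
  | succ m ih =>
    intro i hi hm
    have h1 : i < n := by omega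
    have h2 : i + 1 < n := by omega
    rw [pairLoop, dif_pos h1, anyMismatchFrom, dif_pos h1,
        anyMismatchFrom, dif_pos h2]
    have hmi : PySem.Int.mod i 2 = 0 := by rw [pvMod2]; omega
    have hmi1 : PySem.Int.mod (i + 1) 2 = 1 := by rw [pvMod2]; omega
    rw [hmi, hmi1]; simp only [pvMod2]
    rcases Int.emod_two_eq_zero_or_one (PySem.List.pyGetD arr i 0) with ha | ha
    · have hna : ¬(PySem.List.pyGetD arr i 0 % 2 ≠ 0) := by omega
      rw [if_neg hna, if_neg hna]
      rcases Int.emod_two_eq_zero_or_one (PySem.List.pyGetD arr (i + 1) 0) with hb | hb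
      · have hb2 : PySem.List.pyGetD arr (i + 1) 0 % 2 ≠ 1 := by omega
        rw [if_pos hb, if_pos hb2]
        simp
      · have hnb : ¬(PySem.List.pyGetD arr (i + 1) 0 % 2 = 0) := by omega
        have hnb2 : ¬(PySem.List.pyGetD arr (i + 1) 0 % 2 ≠ 1) := by omega
        rw [if_neg hnb, if_neg hnb2, show i + 1 + 1 = i + 2 from by ring]
        exact ih (i + 2) (by omega) (by push_cast at hm ⊢; omega)
    · have hpa : PySem.List.pyGetD arr i 0 % 2 ≠ 0 := by omega
      rw [if_pos hpa, if_pos hpa]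
      simp

-- ===== VERDICT (by name: the statement is the Claim_ definition above) =====
theorem check_spec : Claim_equal_check := by
  intro arr n _ hpre
  obtain ⟨hn0, -⟩ := hpre
  unfold Spec_check check check_alt
  rw [checkLoop_eq_list arr n (n - 0).toNat 0 0 0 rfl]
  set r := checkLoopL arr (PySem.List.pyRange 0 n 1) (0, 0) with hr
  have hfl := flag_eq arr (PySem.List.pyRange 0 n 1) 0 0
  have hany := anyMismatch_eq_list arr n (n - 0).toNat 0 rfl
  rw [← hr] at hfl
  cases hm : anyMismatchL arr (PySem.List.pyRange 0 n 1) with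
  | true =>
    rw [hm] at hfl; simp at hfl
    have hA : (if r.2.1 ≠ r.2.2 then (0 : Int) else r.1) = 0 := by
      rw [hfl]; split <;> rfl
    have hB : (if PySem.Int.mod n 2 ≠ 0 then (0 : Int) else pairLoop arr n 0) = 0 := by
      rcases Int.emod_two_eq_zero_or_one n with hn | hn
      · rw [if_neg (by rw [pvMod2]; omega)]
        obtain ⟨k, hk⟩ : ∃ k : Nat, n = 2 * (k : Int) := ⟨n.toNat / 2, by omega⟩
        rw [pairLoop_eq arr n hn k 0 (by omega) (by omega), hany, hm]
        simp
      · rw [if_pos (by rw [pvMod2]; omega)]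
    exact hA.trans hB.symm
  | false =>
    rw [hm] at hfl; simp at hfl
    have hc := counts_eq arr (PySem.List.pyRange 0 n 1) 0 0 hm
    rw [← hr] at hc
    have h0 : (0 : Int) + (n.toNat : Int) = n := by omega
    have hb := bal_pyRange n.toNat 0
    rw [h0] at hb
    rcases Int.emod_two_eq_zero_or_one n with hn | hn
    · have hbz : bal (PySem.List.pyRange 0 n 1) = 0 := by
        rw [hb]; exact if_pos (by omega)
      rw [hbz] at hc
      have hA : (if r.2.1 ≠ r.2.2 then (0 : Int) else r.1) = 1 := by
        rw [if_neg (by omega), hfl]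
      have hB : (if PySem.Int.mod n 2 ≠ 0 then (0 : Int) else pairLoop arr n 0) = 1 := by
        rw [if_neg (by rw [pvMod2]; omega)]
        obtain ⟨k, hk⟩ : ∃ k : Nat, n = 2 * (k : Int) := ⟨n.toNat / 2, by omega⟩
        rw [pairLoop_eq arr n hn k 0 (by omega) (by omega), hany, hm]
        simp
      exact hA.trans hB.symm
    · have hbz : bal (PySem.List.pyRange 0 n 1) ≠ 0 := by
        rw [hb]; split_ifs <;> omega
      have hA : (if r.2.1 ≠ r.2.2 then (0 : Int) else r.1) = 0 := by
        rw [if_pos (by omega)]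
      have hB : (if PySem.Int.mod n 2 ≠ 0 then (0 : Int) else pairLoop arr n 0) = 0 := by
        rw [if_pos (by rw [pvMod2]; omega)]
      exact hA.trans hB.symm
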